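-- pv_equiv track=rewrite | github.com/anushkamohanty14/TrueHire | core/src/core/pipelines/phase2_user_input.py | suggest_jobs_from_interest_tags
-- ===== SOURCE A (Python) =====
-- from typing import Any, Dict, List
--
-- def suggest_jobs_from_interest_tags(interest_tags: List[str], job_titles: List[str], top_k: int = 10) -> List[str]:
--     """Simple lexical matching from user interest tags to O*NET job titles."""
--     tags = [t.lower().strip() for t in interest_tags if t.strip()]
--     if not tags:
--         return []
--     ranked: List[tuple[str, int]] = []
--     for title in job_titles:
--         lower_title = title.lower()
--         score = sum(1 for tag in tags if tag in lower_title)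
--         if score > 0:
--             ranked.append((title, score))
--     ranked.sort(key=lambda item: (-item[1], item[0]))
--     return [title for title, _ in ranked[:top_k]]
-- ===== SOURCE B (Python) =====
-- from typing import List
--
-- def suggest_jobs_from_interest_tags(interest_tags: List[str], job_titles: List[str], top_k: int = 10) -> List[str]:
--     """Tag-major scoring into a score vector, then selection-style extraction of the best titles."""
--     tags = [t.lower().strip() for t in interest_tags if t.strip()]
--     if not tags:
--         return []
--     lowered = [t.lower() for t in job_titles]
--     scores = [0] * len(job_titles)
--     for tag in tags:
--         scores = [s + 1 if tag in lt else s for lt, s in zip(lowered, scores)]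
--     remaining = [(t, s) for t, s in zip(job_titles, scores) if s > 0]
--     ordered: List[str] = []
--     while remaining:
--         best = 0
--         for i in range(1, len(remaining)):
--             if remaining[i][1] > remaining[best][1] or \
--                (remaining[i][1] == remaining[best][1] and remaining[i][0] < remaining[best][0]):
--                 best = i
--         ordered.append(remaining.pop(best)[0])
--     return ordered[:top_k]
-- ===== Notes on version B (the rewrite author's own statement) =====
-- stated objective: alternative
-- what changed: A's per-title counting loop followed by one comparison sort under the compound key (-score, title) is replaced by a transposed tag-major pass that updates a whole score vector per tag, then a selection procedure that repeatedly scans the remaining matches and pops the best one; no sort call is made on the matched titles.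
import Mathlib
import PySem

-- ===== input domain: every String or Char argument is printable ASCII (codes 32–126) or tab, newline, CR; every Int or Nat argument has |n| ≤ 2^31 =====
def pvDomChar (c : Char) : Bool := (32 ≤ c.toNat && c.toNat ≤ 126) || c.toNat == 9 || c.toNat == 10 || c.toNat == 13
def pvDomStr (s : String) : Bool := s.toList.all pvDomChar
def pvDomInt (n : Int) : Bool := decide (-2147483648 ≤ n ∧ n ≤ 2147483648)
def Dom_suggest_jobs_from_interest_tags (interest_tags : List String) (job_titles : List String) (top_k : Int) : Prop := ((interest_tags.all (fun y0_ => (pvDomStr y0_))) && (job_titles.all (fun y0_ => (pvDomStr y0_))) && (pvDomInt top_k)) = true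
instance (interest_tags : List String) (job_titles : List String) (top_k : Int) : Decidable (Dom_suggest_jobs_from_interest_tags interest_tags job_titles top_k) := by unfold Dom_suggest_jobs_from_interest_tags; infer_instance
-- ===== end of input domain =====

-- B replaces A's per-title counting loop + compound-key sort by a transposed tag-major scoring
-- pass over a score vector and a selection loop that repeatedly pops the best remaining match
-- (objective: alternative).

-- ===== PORT A =====
-- 'tags = [t.lower().strip() for t in interest_tags if t.strip()]' (identical line in A and B)
def pvTags (interest_tags : List String) : List String :=
  (interest_tags.filter (fun t => !(PySem.Str.strip t == ""))).map
    (fun t => PySem.Str.strip (PySem.Str.lower t))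

-- A's 'lower_title = title.lower(); score = sum(1 for tag in tags if tag in lower_title)'
def pvTitleScore (tags : List String) (title : String) : Int :=
  let lower_title := PySem.Str.lower title
  tags.foldl (fun s tag => if PySem.Str.isIn tag lower_title then s + 1 else s) 0

def suggest_jobs_from_interest_tags (interest_tags : List String) (job_titles : List String) (top_k : Int) : List String :=
  let tags := pvTags interest_tags
  if tags = [] then []
  else
    let ranked := job_titles.foldl (fun acc title =>
        let score := pvTitleScore tags title
        if score > 0 then acc ++ [(title, score)] else acc) ([] : List (String × Int))
    let ranked2 := PySem.List.sorted2 ranked (fun p => -p.2) (fun p => p.1) false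
    (PySem.List.slice ranked2 none (some top_k)).map (fun p => p.1)

-- ===== PORT B =====
-- the comparison of B's inner 'if remaining[i][1] > … or (… and … < …)'
def pvBetter (p q : String × Int) : Bool :=
  p.2 > q.2 || (p.2 == q.2 && p.1 < q.1)

-- 'best = 0; for i in range(1, len(remaining)): if better: best = i'
def pvBest (rem : List (String × Int)) : Int :=
  (PySem.List.pyRange 1 (rem.length : Int) 1).foldl
    (fun b i => if pvBetter (PySem.List.pyGetD rem i ("", 0)) (PySem.List.pyGetD rem b ("", 0)) then i else b) 0

-- 'while remaining: … ordered.append(remaining.pop(best)[0])'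
def pvSelLoop (rem : List (String × Int)) (ordered : List String) : List String :=
  if _hrem : rem = [] then ordered
  else
    match _h : PySem.List.pop? rem (pvBest rem) with
    | none => ordered   -- unreachable (pop index always in range); totality guard only
    | some xr => pvSelLoop xr.2 (ordered ++ [xr.1.1])
termination_by rem.length
decreasing_by
  have := PySem.List.length_of_pop?_eq_some _ _h; omega

def suggest_jobs_from_interest_tags_alt (interest_tags : List String) (job_titles : List String) (top_k : Int) : List String :=
  let tags := pvTags interest_tags
  if tags = [] then []
  else
    let lowered := job_titles.map PySem.Str.lower
    -- 'for tag in tags: scores = [s + 1 if tag in lt else s for lt, s in zip(lowered, scores)]'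
    let scores := tags.foldl (fun sc tag =>
        (lowered.zip sc).map (fun p => if PySem.Str.isIn tag p.1 then p.2 + 1 else p.2))
      (List.replicate job_titles.length (0 : Int))
    let remaining := (job_titles.zip scores).filter (fun p => p.2 > 0)
    let ordered := pvSelLoop remaining []
    PySem.List.slice ordered none (some top_k)

-- ===== PRECONDITION & SPEC =====
def Spec_suggest_jobs_from_interest_tags (interest_tags : List String) (job_titles : List String) (top_k : Int) (out : List String) : Prop := out = suggest_jobs_from_interest_tags_alt interest_tags job_titles top_k
instance (interest_tags : List String) (job_titles : List String) (top_k : Int) (out : List String) : Decidable (Spec_suggest_jobs_from_interest_tags interest_tags job_titles top_k out) := by unfold Spec_suggest_jobs_from_interest_tags; infer_instance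

-- ===== CLAIM =====
def Claim_equal_suggest_jobs_from_interest_tags : Prop := ∀ (interest_tags : List String) (job_titles : List String) (top_k : Int), Dom_suggest_jobs_from_interest_tags interest_tags job_titles top_k → Spec_suggest_jobs_from_interest_tags interest_tags job_titles top_k (suggest_jobs_from_interest_tags interest_tags job_titles top_k)

-- ===== LEMMAS AND PROOFS =====

-- the lexicographic sort key of A's pairs, as a single linearly ordered value
def pvKey (p : String × Int) : Lex (Int × String) := toLex (-p.2, p.1)

theorem pvKey_injective : Function.Injective pvKey := by
  intro p q h
  have h2 : ((-p.2 : Int), p.1) = ((-q.2 : Int), q.1) := toLex.injective h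
  rw [Prod.ext_iff] at h2 ⊢
  exact ⟨h2.2, by omega⟩

-- sorted2 with keys (k1, k2) is sorted with the single Lex key
theorem pv_sorted2_eq_sorted_lex {α : Type} (xs : List α) (k1 : α → Int) (k2 : α → String) :
    PySem.List.sorted2 xs k1 k2 false = PySem.List.sorted xs (fun x => toLex (k1 x, k2 x)) false := by
  have hb : (fun (a b : α) => (decide (k1 a < k1 b) || (!decide (k1 b < k1 a) && decide (k2 a < k2 b))))
      = (fun (a b : α) => decide (toLex (k1 a, k2 a) < toLex (k1 b, k2 b))) := by
    funext a b
    rcases lt_trichotomy (k1 a) (k1 b) with h | h | h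
    · simp [h, Prod.Lex.lt_iff]
    · simp [h, Prod.Lex.lt_iff]
    · simp [Prod.Lex.lt_iff, h, asymm h, h.ne']
  rw [PySem.List.sorted_eq_foldl_insertBy]
  simp only [PySem.List.sorted2]
  rw [hb]
  simp

-- pvBetter decides strict pvKey order
theorem pvBetter_eq (p q : String × Int) : pvBetter p q = decide (pvKey p < pvKey q) := by
  rw [Bool.eq_iff_iff]
  simp [pvBetter, pvKey, Prod.Lex.lt_iff]

-- map commutes with Python slicing
theorem pv_slice_map {α β : Type} (f : α → β) (xs : List α) (a? b? : Option Int) :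
    (PySem.List.slice xs a? b?).map f = PySem.List.slice (xs.map f) a? b? := by
  unfold PySem.List.slice
  cases a? <;> cases b? <;> simp [List.map_take, List.map_drop]

-- the selected index is in range and indexes a pvKey-minimal element
theorem pvBest_aux (rem : List (String × Int)) (m : ℕ) (hm : m < rem.length) :
    ∃ b : ℕ, ∃ hb : b ≤ m,
      ((List.range m).map (fun k : ℕ => (1 : Int) + k)).foldl
        (fun b i => if pvBetter (PySem.List.pyGetD rem i ("", 0)) (PySem.List.pyGetD rem b ("", 0)) then i else b) 0
      = (b : Int) ∧
      ∀ j : ℕ, ∀ _hj : j ≤ m, pvKey (rem.get ⟨b, by omega⟩) ≤ pvKey (rem.get ⟨j, by omega⟩) := by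
  induction m with
  | zero =>
      refine ⟨0, le_refl 0, by simp, ?_⟩
      intro j hj
      interval_cases j
      exact le_refl _
  | succ m ih =>
      obtain ⟨b, hb, heq, hmin⟩ := ih (by omega)
      have hx : PySem.List.pyGetD rem ((1 : Int) + m) ("", 0) = rem.get ⟨m + 1, by omega⟩ := by
        have h1 : ((1 : Int) + m).toNat = m + 1 := by omega
        rw [PySem.List.pyGetD_eq_getElem rem ("", 0) (by omega) (by omega)]
        simp [h1]
      have hy : PySem.List.pyGetD rem (b : Int) ("", 0) = rem.get ⟨b, by omega⟩ := by
        rw [PySem.List.pyGetD_eq_getElem rem ("", 0) (by omega) (by omega)]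
        simp
      rw [List.range_succ, List.map_append, List.foldl_append, heq]
      simp only [List.map_cons, List.map_nil, List.foldl_cons, List.foldl_nil, hx, hy]
      by_cases hB : pvBetter (rem.get ⟨m + 1, by omega⟩) (rem.get ⟨b, by omega⟩) = true
      · refine ⟨m + 1, le_refl _, by rw [hB]; simp; ring, ?_⟩
        intro j hj
        have hlt : pvKey (rem.get ⟨m + 1, by omega⟩) < pvKey (rem.get ⟨b, by omega⟩) := by
          rw [pvBetter_eq] at hB; exact of_decide_eq_true hB
        rcases Nat.lt_or_ge j (m + 1) with hj' | hj'
        · exact le_trans (le_of_lt hlt) (hmin j (by omega))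
        · have : j = m + 1 := by omega
          subst this; exact le_refl _
      · have hge : pvKey (rem.get ⟨b, by omega⟩) ≤ pvKey (rem.get ⟨m + 1, by omega⟩) := by
          rw [pvBetter_eq] at hB
          exact le_of_not_gt (of_decide_eq_false (Bool.of_not_eq_true hB))
        refine ⟨b, by omega, by rw [Bool.of_not_eq_true hB]; simp, ?_⟩
        intro j hj
        rcases Nat.lt_or_ge j (m + 1) with hj' | hj'
        · exact hmin j (by omega)
        · have : j = m + 1 := by omega
          subst this; exact hge

theorem pvBest_spec (rem : List (String × Int)) (hne : rem ≠ []) :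
    ∃ b : ℕ, ∃ hb : b < rem.length, pvBest rem = (b : Int) ∧
      ∀ j : ℕ, ∀ hj : j < rem.length, pvKey (rem.get ⟨b, hb⟩) ≤ pvKey (rem.get ⟨j, hj⟩) := by
  have hn : 1 ≤ rem.length := List.length_pos_iff.mpr hne
  obtain ⟨b, hb, heq, hmin⟩ := pvBest_aux rem (rem.length - 1) (by omega)
  refine ⟨b, by omega, ?_, ?_⟩
  · rw [pvBest, PySem.List.pyRange_one]
    have : ((rem.length : Int) - 1).toNat = rem.length - 1 := by omega
    rw [this]
    exact heq
  · intro j hj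
    exact hmin j (by omega)

-- removing the minimal element names the head of the sorted order
theorem pv_sorted_cons_best (rem : List (String × Int)) (b : ℕ) (hb : b < rem.length)
    (hmin : ∀ j : ℕ, ∀ hj : j < rem.length, pvKey (rem.get ⟨b, hb⟩) ≤ pvKey (rem.get ⟨j, hj⟩)) :
    PySem.List.sorted rem pvKey false
      = rem.get ⟨b, hb⟩ :: PySem.List.sorted (rem.eraseIdx b) pvKey false := by
  have hminmem : ∀ y ∈ rem, pvKey (rem.get ⟨b, hb⟩) ≤ pvKey y := by
    intro y hy
    obtain ⟨i, hi, rfl⟩ := List.mem_iff_getElem.mp hy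
    exact hmin i hi
  apply PySem.List.eq_of_perm_of_pairwise_le_of_injective pvKey pvKey_injective
  · exact (PySem.List.sorted_perm rem pvKey false).trans
      (((List.getElem_cons_eraseIdx_perm hb).symm).trans
        ((PySem.List.sorted_perm (rem.eraseIdx b) pvKey false).symm.cons _))
  · exact PySem.List.sorted_pairwise rem pvKey
  · refine List.pairwise_cons.mpr ⟨?_, PySem.List.sorted_pairwise (rem.eraseIdx b) pvKey⟩
    intro y hy
    exact hminmem y (List.mem_of_mem_eraseIdx ((PySem.List.mem_sorted _ _ _ _).mp hy))

-- the selection loop produces the stable-sorted order of the remaining pairs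
theorem pvSelLoop_eq_sorted (rem : List (String × Int)) (acc : List String) :
    pvSelLoop rem acc = acc ++ (PySem.List.sorted rem pvKey false).map (fun p => p.1) := by
  induction hn : rem.length using Nat.strong_induction_on generalizing rem acc with
  | _ n ih =>
      by_cases hne : rem = []
      · subst hne; rw [pvSelLoop]; simp [PySem.List.sorted]
      · obtain ⟨b, hb, hbe, hmin⟩ := pvBest_spec rem hne
        have hpop : PySem.List.pop? rem (pvBest rem) = some (rem[b], rem.eraseIdx b) := by
          rw [hbe]; exact PySem.List.pop?_natCast rem b hb
        rw [pvSelLoop, dif_neg hne]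
        split
        · rename_i hnone
          rw [hpop] at hnone; exact absurd hnone (by simp)
        · rename_i xr hsome
          rw [hpop] at hsome
          obtain rfl : xr = (rem[b], rem.eraseIdx b) := by injection hsome.symm
          have hlen : (rem.eraseIdx b).length < n := by
            rw [List.length_eraseIdx]
            simp only [hb, if_pos]
            omega
          rw [ih _ (by omega) _ _ rfl]
          rw [pv_sorted_cons_best rem b hb hmin]
          simp

-- transposed tag-major scoring computes each title's score
theorem pv_scores_aux (tags : List String) (lowered : List String) (g : String → Int) :
    tags.foldl (fun sc tag =>
        (lowered.zip sc).map (fun p => if PySem.Str.isIn tag p.1 then p.2 + 1 else p.2))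
      (lowered.map g)
    = lowered.map (fun lt => tags.foldl (fun s tag => if PySem.Str.isIn tag lt then s + 1 else s) (g lt)) := by
  induction tags generalizing g with
  | nil => simp
  | cons tag tags ih =>
      simp only [List.foldl_cons]
      have hz : lowered.zip (lowered.map g) = lowered.map (fun x => (x, g x)) := by
        have := List.zip_map' (f := @id String) (g := g) (l := lowered)
        simpa using this
      rw [hz, List.map_map]
      exact ih (fun lt => if PySem.Str.isIn tag lt then g lt + 1 else g lt)

theorem pv_scores_eq (tags : List String) (jt : List String) :
    tags.foldl (fun sc tag =>
        ((jt.map PySem.Str.lower).zip sc).map (fun p => if PySem.Str.isIn tag p.1 then p.2 + 1 else p.2))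
      (List.replicate jt.length (0 : Int))
    = jt.map (fun t => pvTitleScore tags t) := by
  have h0 : List.replicate jt.length (0 : Int) = (jt.map PySem.Str.lower).map (fun _ => 0) := by
    rw [List.map_map]
    exact (List.map_eq_replicate_iff.mpr (fun x _ => rfl)).symm
  rw [h0, pv_scores_aux tags (jt.map PySem.Str.lower) (fun _ => 0), List.map_map]
  rfl

-- ===== VERDICT =====
theorem suggest_jobs_from_interest_tags_spec : Claim_equal_suggest_jobs_from_interest_tags := by
  intro interest_tags job_titles top_k _
  show suggest_jobs_from_interest_tags interest_tags job_titles top_k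
      = suggest_jobs_from_interest_tags_alt interest_tags job_titles top_k
  unfold suggest_jobs_from_interest_tags suggest_jobs_from_interest_tags_alt
  by_cases h : pvTags interest_tags = []
  · simp [h]
  · simp only [h, if_false]
    set tags := pvTags interest_tags with htags
    have hranked : job_titles.foldl (fun acc title =>
          let score := pvTitleScore tags title
          if score > 0 then acc ++ [(title, score)] else acc) ([] : List (String × Int))
        = (job_titles.filter (fun t => decide (pvTitleScore tags t > 0))).map
            (fun t => (t, pvTitleScore tags t)) := by
      simpa using PySem.List.foldl_append_ite (p := fun t => pvTitleScore tags t > 0)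
        (f := fun t => (t, pvTitleScore tags t)) job_titles []
    have hzip : job_titles.zip (job_titles.map (fun t => pvTitleScore tags t))
        = job_titles.map (fun t => (t, pvTitleScore tags t)) := by
      have := List.zip_map' (f := @id String) (g := fun t => pvTitleScore tags t) (l := job_titles)
      simpa using this
    have hrem : (job_titles.zip (job_titles.map (fun t => pvTitleScore tags t))).filter
          (fun p => p.2 > 0)
        = (job_titles.filter (fun t => decide (pvTitleScore tags t > 0))).map
            (fun t => (t, pvTitleScore tags t)) := by
      rw [hzip, List.filter_map]
      rfl
    rw [hranked, pv_scores_eq tags job_titles, hrem, pvSelLoop_eq_sorted, List.nil_append,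
      pv_sorted2_eq_sorted_lex, pv_slice_map]
    rfl
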